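-- pv_equiv track=rewrite | github.com/0626na/algorithms | 프로그래머스/코딩기초트레이닝/전국 대회 선발 고사.py | solution
-- ===== SOURCE A (Python) =====
-- def solution(rank, attendance):
--     enabled = []
--     students = []
--     for idx, attend in enumerate(attendance):
--         if not attend:
--             continue
--         if len(enabled) < 3:
--             enabled += [rank[idx]]
--         elif len(enabled) == 3:
--             enabled += [rank[idx]]
--             enabled.sort()
--             enabled.pop()
--
--     enabled.sort()
--     for r in enabled:
--         students.append(rank.index(r))
--     a, b, c = students
--
--     return 10000 * a + 100 * b + c
-- ===== SOURCE B (Python) =====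
-- def solution(rank, attendance):
--     vals = sorted(rank[i] for i, att in enumerate(attendance) if att)
--     a, b, c = [rank.index(r) for r in vals[:3]]
--     return 10000 * a + 100 * b + c
-- ===== Notes on version B (the rewrite author's own statement) =====
-- stated objective: simpler
-- what changed: Replaces A's online bounded-size selection loop (append, sort, pop to keep the three smallest) with a one-shot sort of all attending ranks followed by taking the first three, keeping the same rank.index value-to-index mapping.
import Mathlib
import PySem

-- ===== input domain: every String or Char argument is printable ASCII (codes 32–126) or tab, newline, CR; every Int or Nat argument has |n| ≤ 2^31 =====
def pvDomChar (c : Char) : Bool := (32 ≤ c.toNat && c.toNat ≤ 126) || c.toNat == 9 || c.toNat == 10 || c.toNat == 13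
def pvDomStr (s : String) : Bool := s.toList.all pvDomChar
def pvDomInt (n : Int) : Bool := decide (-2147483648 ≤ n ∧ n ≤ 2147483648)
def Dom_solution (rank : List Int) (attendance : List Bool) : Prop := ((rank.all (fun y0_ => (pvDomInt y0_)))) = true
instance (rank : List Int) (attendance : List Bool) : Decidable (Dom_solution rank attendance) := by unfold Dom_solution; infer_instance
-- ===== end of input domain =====

-- B replaces A's online bounded-size selection loop with a one-shot sort of all
-- attending ranks followed by taking the first three (objective: simpler).

-- B-side helper, placed before port A only so that Lean's shared list-match
-- auxiliary is attached to it rather than to port A: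
-- a, b, c = students  (three-element unpack; anything else raises in Python, outside Pre_)
def unpack3 (students : List Int) : Int :=
  match students with
  | [a, b, c] => 10000 * a + 100 * b + c
  | _ => 0

-- ===== PORT A =====
-- literal transliteration of A: keep at most 3 smallest via append/sort/pop,
-- then sort, map each value to its first index in rank, unpack three.
def solution (rank : List Int) (attendance : List Bool) : Int :=
  let enabled :=
    (PySem.List.enumerate attendance 0).foldl
      (fun enabled p =>
        if !p.2 then enabled
        else if enabled.length < 3 then enabled ++ [PySem.List.pyGetD rank p.1 0]
        else if enabled.length = 3 then
          (PySem.List.sorted (enabled ++ [PySem.List.pyGetD rank p.1 0]) (fun x => x) false).dropLast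
        else enabled)
      ([] : List Int)
  let enabled := PySem.List.sorted enabled (fun x => x) false
  let students := enabled.map (fun r => ((PySem.List.index? rank r).getD 0 : Int))
  match students with
  | [a, b, c] => 10000 * a + 100 * b + c
  | _ => 0        -- a, b, c unpack fails in Python unless exactly three (outside Pre_)

-- ===== PORT B =====
def solution_alt (rank : List Int) (attendance : List Bool) : Int :=
  let vals :=
    PySem.List.sorted
      ((PySem.List.enumerate attendance 0).filterMap
        (fun p => if p.2 then PySem.List.pyGet? rank p.1 else none))
      (fun x => x) false
  unpack3 ((vals.take 3).map (fun r => ((PySem.List.index? rank r).getD 0 : Int)))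

-- ===== PRECONDITION & SPEC =====
-- Pre_ excludes exactly the inputs where A raises: an attending index beyond
-- rank (IndexError rank[idx]) or fewer than three attending (a,b,c unpack ValueError).
def Pre_solution (rank : List Int) (attendance : List Bool) : Prop :=
  ((attendance.drop rank.length).all (fun b => !b)) = true ∧ 3 ≤ attendance.count true

instance (rank : List Int) (attendance : List Bool) : Decidable (Pre_solution rank attendance) := by
  unfold Pre_solution; infer_instance

def pvWitness_solution : List Int × List Bool := ([3, 7, 2, 5], [true, true, false, true])

def Spec_solution (rank : List Int) (attendance : List Bool) (out : Int) : Prop := out = solution_alt rank attendance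
instance (rank : List Int) (attendance : List Bool) (out : Int) : Decidable (Spec_solution rank attendance out) := by unfold Spec_solution; infer_instance

-- ===== CLAIM (what is proved, stated in full; the proofs are below) =====
def Claim_equal_solution : Prop := ∀ (rank : List Int) (attendance : List Bool), Dom_solution rank attendance → Pre_solution rank attendance → Spec_solution rank attendance (solution rank attendance)

-- ===== LEMMAS AND PROOFS =====

-- the identity sort used by both ports
def sortI (l : List Int) : List Int := PySem.List.sorted l (fun x => x) false

theorem sortI_pairwise (l : List Int) : (sortI l).Pairwise (· ≤ ·) := by
  have := PySem.List.sorted_pairwise l (fun x => x)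
  simpa [sortI] using this

theorem sortI_length (l : List Int) : (sortI l).length = l.length :=
  (PySem.List.sorted_perm l (fun x => x) false).length_eq

theorem sortI_char {l ys : List Int} (hp : ys.Perm l) (hs : ys.Pairwise (· ≤ ·)) :
    sortI l = ys :=
  PySem.List.sorted_id_eq_of_perm_of_pairwise l ys hp hs

-- sort of (l ++ [v]) is ordered insertion of v into sort l
theorem sortI_append_singleton (l : List Int) (v : Int) :
    sortI (l ++ [v]) = List.orderedInsert (· ≤ ·) v (sortI l) := by
  apply sortI_char
  · exact ((List.perm_orderedInsert _ v (sortI l)).trans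
      ((PySem.List.sorted_perm l (fun x => x) false).cons v)).trans
      (List.perm_append_comm (l₁ := [v]) (l₂ := l))
  · exact List.Pairwise.orderedInsert v (sortI l) (sortI_pairwise l)

-- taking n after inserting v only depends on the first n elements
theorem orderedInsert_take (s : List Int) (n : Nat) (v : Int) :
    (List.orderedInsert (· ≤ ·) v s).take n
      = (List.orderedInsert (· ≤ ·) v (s.take n)).take n := by
  induction s generalizing n with
  | nil => simp
  | cons b t ih =>
    by_cases hvb : v ≤ b
    · cases n with
      | zero => simp
      | succ m =>
        cases m with
        | zero => simp [List.orderedInsert, hvb]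
        | succ k =>
          simp [List.orderedInsert, hvb, List.take_take]
    · cases n with
      | zero => simp
      | succ m =>
        simp [List.orderedInsert, hvb, ih m]

-- A's loop step on a new value
def stepA (e : List Int) (v : Int) : List Int :=
  if e.length < 3 then e ++ [v]
  else if e.length = 3 then (PySem.List.sorted (e ++ [v]) (fun x => x) false).dropLast
  else e

-- the guarded fold over pairs is the fold of stepA over the attending values
theorem foldl_guard (rank : List Int) (L : List (Int × Bool)) (acc : List Int) :
    L.foldl
      (fun enabled p =>
        if !p.2 then enabled
        else if enabled.length < 3 then enabled ++ [PySem.List.pyGetD rank p.1 0]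
        else if enabled.length = 3 then
          (PySem.List.sorted (enabled ++ [PySem.List.pyGetD rank p.1 0]) (fun x => x) false).dropLast
        else enabled) acc
    = (L.filterMap (fun p => if p.2 then some (PySem.List.pyGetD rank p.1 0) else none)).foldl stepA acc := by
  induction L generalizing acc with
  | nil => rfl
  | cons p t ih =>
    rcases p with ⟨i, b⟩
    cases b
    · simpa using ih acc
    · simpa [stepA] using ih _

-- invariant of A's loop: sorted state = first three of the sorted collected values
theorem loop_invariant (ws : List Int) :
    sortI (ws.foldl stepA []) = (sortI ws).take 3
      ∧ (ws.foldl stepA []).length = min ws.length 3 := by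
  induction ws using List.reverseRecOn with
  | nil => constructor <;> simp [sortI, PySem.List.sorted]
  | append_singleton ws' v ih =>
    obtain ⟨h1, h2⟩ := ih
    set e := ws'.foldl stepA [] with he
    have hperm : e.Perm (sortI e) := (PySem.List.sorted_perm e (fun x => x) false).symm
    have hlen_sort : (sortI ws').length = ws'.length :=
      (PySem.List.sorted_perm ws' (fun x => x) false).length_eq
    rw [List.foldl_append, List.foldl_cons, List.foldl_nil, ← he]
    by_cases hlt : e.length < 3
    · -- fewer than three collected so far: plain append
      have hw : ws'.length < 3 := by omega
      have htk : (sortI ws').take 3 = sortI ws' := by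
        apply List.take_of_length_le; omega
      have hew : e.Perm ws' := hperm.trans (by rw [h1, htk]; exact PySem.List.sorted_perm ws' (fun x => x) false)
      have hperm2 : (e ++ [v]).Perm (ws' ++ [v]) := hew.append_right [v]
      have hsorteq : sortI (e ++ [v]) = sortI (ws' ++ [v]) := by
        apply sortI_char
        · exact (PySem.List.sorted_perm (ws' ++ [v]) (fun x => x) false).trans hperm2.symm
        · exact sortI_pairwise (ws' ++ [v])
      have hstep : stepA e v = e ++ [v] := by simp [stepA, hlt]
      rw [hstep]
      constructor
      · rw [hsorteq]
        have hle : (sortI (ws' ++ [v])).length ≤ 3 := by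
          rw [sortI_length]; simp; omega
        rw [List.take_of_length_le hle]
      · simp; omega
    · -- already three: append, sort, pop the largest
      have he3 : e.length = 3 := by omega
      have hw3 : 3 ≤ ws'.length := by omega
      have hstep : stepA e v = (sortI (e ++ [v])).dropLast := by
        simp [stepA, sortI, he3]
      rw [hstep]
      have hkey : sortI (e ++ [v]) = List.orderedInsert (· ≤ ·) v (sortI e) :=
        sortI_append_singleton e v
      have hlen4 : (sortI (e ++ [v])).length = 4 := by
        rw [sortI_length]; simp [he3]
      have hdrop : (sortI (e ++ [v])).dropLast = (sortI (e ++ [v])).take 3 := by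
        rw [List.dropLast_eq_take, hlen4]
      have hmain : (sortI (e ++ [v])).take 3 = (sortI (ws' ++ [v])).take 3 := by
        rw [hkey, h1, ← orderedInsert_take (sortI ws') 3 v, sortI_append_singleton ws' v]
      have hpw : ((sortI (e ++ [v])).take 3).Pairwise (· ≤ ·) :=
        (sortI_pairwise (e ++ [v])).sublist (List.take_sublist 3 _)
      constructor
      · rw [hdrop]
        have hfix : sortI ((sortI (e ++ [v])).take 3) = (sortI (e ++ [v])).take 3 :=
          sortI_char (List.Perm.refl _) hpw
        rw [hfix, hmain]
      · rw [hdrop, List.length_take, hlen4]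
        simp; omega

-- under Pre_, every attending index is in range, so pyGet? agrees with pyGetD
theorem filterMap_congr_pre (rank : List Int) (attendance : List Bool)
    (hpre : ((attendance.drop rank.length).all (fun b => !b)) = true) :
    (PySem.List.enumerate attendance 0).filterMap
        (fun p => if p.2 then PySem.List.pyGet? rank p.1 else none)
      = (PySem.List.enumerate attendance 0).filterMap
        (fun p => if p.2 then some (PySem.List.pyGetD rank p.1 0) else none) := by
  apply List.filterMap_congr
  intro p hp
  rcases (PySem.List.mem_enumerate_iff attendance 0 p).mp hp with ⟨k, hk, rfl⟩
  cases hb : attendance[k] with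
  | false => simp
  | true =>
    have hkr : k < rank.length := by
      by_contra hge
      rw [Nat.not_lt] at hge
      have hlt2 : k - rank.length < (attendance.drop rank.length).length := by
        simp; omega
      have h2 : (attendance.drop rank.length)[k - rank.length]'hlt2 = attendance[k] := by
        rw [List.getElem_drop]; congr 1; omega
      have hmem : attendance[k] ∈ attendance.drop rank.length := h2 ▸ List.getElem_mem hlt2
      have := List.all_eq_true.mp hpre _ hmem
      simp [hb] at this
    simp [PySem.List.pyGetD_natCast, List.getD_eq_getElem?_getD, hkr]

-- ===== VERDICT (by name: the statement is the Claim_ definition above) =====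
theorem solution_spec : Claim_equal_solution := by
  intro rank attendance _ hpre
  obtain ⟨h1, _⟩ := hpre
  unfold Spec_solution
  simp only [solution, solution_alt]
  rw [filterMap_congr_pre rank attendance h1, foldl_guard]
  set ws := (PySem.List.enumerate attendance 0).filterMap
    (fun p => if p.2 then some (PySem.List.pyGetD rank p.1 0) else none) with hws
  have hinv := (loop_invariant ws).1
  simp only [sortI] at hinv
  rw [hinv]
  rfl
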